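-- pv_equiv track=rewrite | github.com/Serigne47/.vscode | backend/agent/archives1/operational_agent1.py | _structure_metrics
-- ===== SOURCE A (Python) =====
-- from typing import Dict, List, Any, Optional, Set
--
-- def _structure_metrics(metrics: List) -> List[str]:
--     """Structure et catégorise les métriques"""
--     structured = {
--         'delivery': [],
--         'quality': [],
--         'service': [],
--         'operational': [],
--         'other': []
--     }
--
--     for metric in metrics:
--         metric_str = str(metric).lower()
--
--         if any(kw in metric_str for kw in ['delivery', 'on-time', 'otif', 'transit']):
--             structured['delivery'].append(metric)
--         elif any(kw in metric_str for kw in ['damage', 'loss', 'claim', 'error']):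
--             structured['quality'].append(metric)
--         elif any(kw in metric_str for kw in ['response', 'resolution', 'fill rate']):
--             structured['service'].append(metric)
--         elif any(kw in metric_str for kw in ['customs', 'temperature', 'system']):
--             structured['operational'].append(metric)
--         else:
--             structured['other'].append(metric)
--
--     # Flatten en gardant les catégories non vides
--     result = []
--     for category, items in structured.items():
--         if items:
--             result.extend(items)
--
--     return result
-- ===== SOURCE B (Python) =====
-- _KEYWORD_GROUPS = [
--     ['delivery', 'on-time', 'otif', 'transit'],
--     ['damage', 'loss', 'claim', 'error'],
--     ['response', 'resolution', 'fill rate'],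
--     ['customs', 'temperature', 'system'],
-- ]
--
-- def _category_rank(metric) -> int:
--     metric_str = str(metric).lower()
--     for rank, kws in enumerate(_KEYWORD_GROUPS):
--         if any(kw in metric_str for kw in kws):
--             return rank
--     return 4
--
-- def _structure_metrics(metrics):
--     return sorted(metrics, key=_category_rank)
-- ===== Notes on version B (the rewrite author's own statement) =====
-- stated objective: idiomatic
-- what changed: Replaces the five explicit bucket lists and the flatten loop by a single stable sort keyed by an integer category rank (0..4, same keyword groups in the same priority order), relying on sort stability to keep input order within each category.
import Mathlib
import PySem

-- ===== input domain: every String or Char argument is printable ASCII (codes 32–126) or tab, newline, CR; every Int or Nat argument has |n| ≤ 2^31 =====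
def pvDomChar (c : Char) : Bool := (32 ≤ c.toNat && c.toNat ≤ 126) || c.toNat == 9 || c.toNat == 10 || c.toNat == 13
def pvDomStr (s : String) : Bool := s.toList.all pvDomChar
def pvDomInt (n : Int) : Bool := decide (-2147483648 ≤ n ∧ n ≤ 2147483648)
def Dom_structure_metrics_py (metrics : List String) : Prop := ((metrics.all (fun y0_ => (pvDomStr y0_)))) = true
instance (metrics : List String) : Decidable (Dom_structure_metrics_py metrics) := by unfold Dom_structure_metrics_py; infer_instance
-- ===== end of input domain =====

-- B replaces A's explicit category buckets and flatten loop by a single stable sort keyed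
-- by the category rank (objective: idiomatic; not faster).

-- ===== PORT A =====
-- the for-loop of A: five bucket lists carried through the recursion (the dict has fixed literal keys)
def structALoop : List String → List String → List String → List String → List String → List String →
    (List String × List String × List String × List String × List String)
  | [], d, q, sv, op, ot => (d, q, sv, op, ot)
  | m :: rest, d, q, sv, op, ot =>
    let ms := PySem.Str.lower m
    if (["delivery", "on-time", "otif", "transit"]).any (fun kw => PySem.Str.isIn kw ms) then
      structALoop rest (d ++ [m]) q sv op ot
    else if (["damage", "loss", "claim", "error"]).any (fun kw => PySem.Str.isIn kw ms) then
      structALoop rest d (q ++ [m]) sv op ot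
    else if (["response", "resolution", "fill rate"]).any (fun kw => PySem.Str.isIn kw ms) then
      structALoop rest d q (sv ++ [m]) op ot
    else if (["customs", "temperature", "system"]).any (fun kw => PySem.Str.isIn kw ms) then
      structALoop rest d q sv (op ++ [m]) ot
    else
      structALoop rest d q sv op (ot ++ [m])

def structure_metrics_py (metrics : List String) : List String :=
  let b := structALoop metrics [] [] [] [] []
  -- flatten: for category, items in structured.items(): if items: result.extend(items)
  ([("delivery", b.1), ("quality", b.2.1), ("service", b.2.2.1),
    ("operational", b.2.2.2.1), ("other", b.2.2.2.2)]).foldl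
    (fun res ci => if ci.2 ≠ [] then res ++ ci.2 else res) []

-- ===== PORT B =====
-- the for rank, kws in enumerate(_KEYWORD_GROUPS) loop of _category_rank, with early return
def rankLoop (ms : String) : List (Int × List String) → Int
  | [] => 4
  | (i, kws) :: rest =>
    if kws.any (fun kw => PySem.Str.isIn kw ms) then i else rankLoop ms rest

def category_rank (m : String) : Int :=
  rankLoop (PySem.Str.lower m)
    (PySem.List.enumerate
      [["delivery", "on-time", "otif", "transit"],
       ["damage", "loss", "claim", "error"],
       ["response", "resolution", "fill rate"],
       ["customs", "temperature", "system"]])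

def structure_metrics_py_alt (metrics : List String) : List String :=
  PySem.List.sorted metrics category_rank false

-- ===== PRECONDITION & SPEC =====
def Spec_structure_metrics_py (metrics : List String) (out : List String) : Prop := out = structure_metrics_py_alt metrics
instance (metrics : List String) (out : List String) : Decidable (Spec_structure_metrics_py metrics out) := by unfold Spec_structure_metrics_py; infer_instance

-- ===== CLAIM (what is proved, stated in full; the proofs are below) =====
def Claim_equal_structure_metrics_py : Prop := ∀ (metrics : List String), Dom_structure_metrics_py metrics → Spec_structure_metrics_py metrics (structure_metrics_py metrics)

-- ===== LEMMAS AND PROOFS =====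

-- category tests, in A's (and B's) priority order
def c0 (m : String) : Bool := (["delivery", "on-time", "otif", "transit"]).any (fun kw => PySem.Str.isIn kw (PySem.Str.lower m))
def c1 (m : String) : Bool := (["damage", "loss", "claim", "error"]).any (fun kw => PySem.Str.isIn kw (PySem.Str.lower m))
def c2 (m : String) : Bool := (["response", "resolution", "fill rate"]).any (fun kw => PySem.Str.isIn kw (PySem.Str.lower m))
def c3 (m : String) : Bool := (["customs", "temperature", "system"]).any (fun kw => PySem.Str.isIn kw (PySem.Str.lower m))

theorem rank_eq (m : String) :
    category_rank m =
      if c0 m then 0 else if c1 m then 1 else if c2 m then 2 else if c3 m then 3 else 4 := rfl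

def bkt (i : Int) (xs : List String) : List String := xs.filter (fun m => category_rank m == i)

def concat5 (xs : List String) : List String :=
  bkt 0 xs ++ bkt 1 xs ++ bkt 2 xs ++ bkt 3 xs ++ bkt 4 xs

theorem rank_mem_bkt {i : Int} {xs : List String} {y : String} (h : y ∈ bkt i xs) :
    category_rank y = i := by
  simp [bkt, List.mem_filter] at h
  exact h.2

theorem structALoop_cons (m : String) (rest d q sv op ot : List String) :
    structALoop (m :: rest) d q sv op ot =
      if c0 m then structALoop rest (d ++ [m]) q sv op ot
      else if c1 m then structALoop rest d (q ++ [m]) sv op ot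
      else if c2 m then structALoop rest d q (sv ++ [m]) op ot
      else if c3 m then structALoop rest d q sv (op ++ [m]) ot
      else structALoop rest d q sv op (ot ++ [m]) := rfl

theorem structALoop_eq (xs : List String) :
    ∀ d q sv op ot, structALoop xs d q sv op ot =
      (d ++ bkt 0 xs, q ++ bkt 1 xs, sv ++ bkt 2 xs, op ++ bkt 3 xs, ot ++ bkt 4 xs) := by
  induction xs with
  | nil => intro d q sv op ot; simp [structALoop, bkt]
  | cons m rest ih =>
    intro d q sv op ot
    rw [structALoop_cons]
    by_cases h0 : c0 m
    · have e : category_rank m = 0 := by simp [rank_eq, h0]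
      rw [if_pos h0, ih]
      simp [bkt, e]
    · by_cases h1 : c1 m
      · have e : category_rank m = 1 := by simp [rank_eq, h0, h1]
        rw [if_neg h0, if_pos h1, ih]
        simp [bkt, e]
      · by_cases h2 : c2 m
        · have e : category_rank m = 2 := by simp [rank_eq, h0, h1, h2]
          rw [if_neg h0, if_neg h1, if_pos h2, ih]
          simp [bkt, e]
        · by_cases h3 : c3 m
          · have e : category_rank m = 3 := by simp [rank_eq, h0, h1, h2, h3]
            rw [if_neg h0, if_neg h1, if_neg h2, if_pos h3, ih]
            simp [bkt, e]
          · have e : category_rank m = 4 := by simp [rank_eq, h0, h1, h2, h3]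
            rw [if_neg h0, if_neg h1, if_neg h2, if_neg h3, ih]
            simp [bkt, e]

theorem flatten_step (res l : List String) : (if l ≠ [] then res ++ l else res) = res ++ l := by
  split_ifs with h
  · rfl
  · simp at h; simp [h]

theorem A_eq_concat5 (metrics : List String) : structure_metrics_py metrics = concat5 metrics := by
  unfold structure_metrics_py
  rw [structALoop_eq]
  simp only [List.foldl, flatten_step, concat5]
  simp

-- inserting into a segment all of whose elements come strictly before x
theorem insertBy_skip {α : Type} (before : α → α → Bool) (x : α) (l1 l2 : List α)
    (h : ∀ y ∈ l1, before x y = false) :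
    PySem.List.insertBy before x (l1 ++ l2) = l1 ++ PySem.List.insertBy before x l2 := by
  induction l1 with
  | nil => simp
  | cons y ys ih =>
    simp only [List.cons_append, PySem.List.insertBy]
    rw [h y (by simp)]
    simp only [if_false, Bool.false_eq_true]
    rw [ih (fun z hz => h z (by simp [hz]))]

theorem insertBy_front {α : Type} (before : α → α → Bool) (x : α) (l : List α)
    (h : ∀ y ∈ l, before x y = true) :
    PySem.List.insertBy before x l = x :: l := by
  cases l with
  | nil => rfl
  | cons y ys => simp [PySem.List.insertBy, h y (by simp)]

theorem bkt_append_singleton (i : Int) (ys : List String) (x : String) :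
    bkt i (ys ++ [x]) = bkt i ys ++ (if category_rank x == i then [x] else []) := by
  simp [bkt, List.filter_append, List.filter_cons]

theorem rank_cases (m : String) :
    category_rank m = 0 ∨ category_rank m = 1 ∨ category_rank m = 2 ∨
    category_rank m = 3 ∨ category_rank m = 4 := by
  rw [rank_eq]; split_ifs <;> simp

theorem before_false {x y : String} (hy : category_rank y ≤ category_rank x) :
    (fun a b => decide (category_rank a < category_rank b)) x y = false := by
  simp; omega

theorem before_true {x y : String} (hy : category_rank x < category_rank y) :
    (fun a b => decide (category_rank a < category_rank b)) x y = true := by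
  simp; omega

theorem insert_concat5 (x : String) (ys : List String) :
    PySem.List.insertBy (fun a b => decide (category_rank a < category_rank b)) x (concat5 ys)
      = concat5 (ys ++ [x]) := by
  rcases rank_cases x with hr | hr | hr | hr | hr
  · -- rank 0: insert right after bucket 0
    unfold concat5
    rw [show bkt 0 ys ++ bkt 1 ys ++ bkt 2 ys ++ bkt 3 ys ++ bkt 4 ys
        = bkt 0 ys ++ (bkt 1 ys ++ bkt 2 ys ++ bkt 3 ys ++ bkt 4 ys) by simp,
      insertBy_skip _ _ _ _ (by
        intro y hy
        have e := rank_mem_bkt hy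
        exact before_false (by simp [e, hr])),
      insertBy_front _ _ _ (by
        intro y hy
        simp [bkt, List.mem_filter] at hy
        rcases hy with ⟨-, e⟩ | ⟨-, e⟩ | ⟨-, e⟩ | ⟨-, e⟩ <;>
          exact before_true (by simp [e, hr]))]
    simp [bkt_append_singleton, hr]
  · -- rank 1
    unfold concat5
    rw [show bkt 0 ys ++ bkt 1 ys ++ bkt 2 ys ++ bkt 3 ys ++ bkt 4 ys
        = (bkt 0 ys ++ bkt 1 ys) ++ (bkt 2 ys ++ bkt 3 ys ++ bkt 4 ys) by simp,
      insertBy_skip _ _ _ _ (by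
        intro y hy
        simp [bkt, List.mem_filter] at hy
        rcases hy with ⟨-, e⟩ | ⟨-, e⟩ <;>
          exact before_false (by simp [e, hr])),
      insertBy_front _ _ _ (by
        intro y hy
        simp [bkt, List.mem_filter] at hy
        rcases hy with ⟨-, e⟩ | ⟨-, e⟩ | ⟨-, e⟩ <;>
          exact before_true (by simp [e, hr]))]
    simp [bkt_append_singleton, hr]
  · -- rank 2
    unfold concat5
    rw [show bkt 0 ys ++ bkt 1 ys ++ bkt 2 ys ++ bkt 3 ys ++ bkt 4 ys
        = (bkt 0 ys ++ bkt 1 ys ++ bkt 2 ys) ++ (bkt 3 ys ++ bkt 4 ys) by simp,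
      insertBy_skip _ _ _ _ (by
        intro y hy
        simp [bkt, List.mem_filter] at hy
        rcases hy with ⟨-, e⟩ | ⟨-, e⟩ | ⟨-, e⟩ <;>
          exact before_false (by simp [e, hr])),
      insertBy_front _ _ _ (by
        intro y hy
        simp [bkt, List.mem_filter] at hy
        rcases hy with ⟨-, e⟩ | ⟨-, e⟩ <;>
          exact before_true (by simp [e, hr]))]
    simp [bkt_append_singleton, hr]
  · -- rank 3
    unfold concat5
    rw [show bkt 0 ys ++ bkt 1 ys ++ bkt 2 ys ++ bkt 3 ys ++ bkt 4 ys
        = (bkt 0 ys ++ bkt 1 ys ++ bkt 2 ys ++ bkt 3 ys) ++ bkt 4 ys by simp,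
      insertBy_skip _ _ _ _ (by
        intro y hy
        simp [bkt, List.mem_filter] at hy
        rcases hy with ⟨-, e⟩ | ⟨-, e⟩ | ⟨-, e⟩ | ⟨-, e⟩ <;>
          exact before_false (by simp [e, hr])),
      insertBy_front _ _ _ (by
        intro y hy
        have e := rank_mem_bkt hy
        exact before_true (by simp [e, hr]))]
    simp [bkt_append_singleton, hr]
  · -- rank 4: goes to the very end
    rw [PySem.List.insertBy_of_forall_not_before _ _ _ (by
      intro y hy
      unfold concat5 at hy
      simp [bkt, List.mem_filter] at hy
      rcases hy with ⟨-, e⟩ | ⟨-, e⟩ | ⟨-, e⟩ | ⟨-, e⟩ | ⟨-, e⟩ <;>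
        exact before_false (by simp [e, hr]))]
    unfold concat5
    simp [bkt_append_singleton, hr]

theorem foldl_ins (xs : List String) : ∀ ys : List String,
    xs.foldl (fun acc x =>
      PySem.List.insertBy (fun a b => decide (category_rank a < category_rank b)) x acc)
      (concat5 ys) = concat5 (ys ++ xs) := by
  induction xs with
  | nil => intro ys; simp
  | cons x rest ih =>
    intro ys
    simp only [List.foldl_cons]
    rw [insert_concat5, ih]
    simp

theorem B_eq_concat5 (metrics : List String) :
    structure_metrics_py_alt metrics = concat5 metrics := by
  unfold structure_metrics_py_alt
  rw [PySem.List.sorted_eq_foldl_insertBy]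
  have := foldl_ins metrics []
  simpa [concat5, bkt] using this

-- ===== VERDICT (by name: the statement is the Claim_ definition above) =====
theorem structure_metrics_py_spec : Claim_equal_structure_metrics_py := by
  intro metrics _
  unfold Spec_structure_metrics_py
  rw [A_eq_concat5, B_eq_concat5]
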